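-- pv_equiv track=rewrite | github.com/DIONG666/KGFP-Reliability-Assessment | concept_organizationheadquarteredincity/rule_matching.py | create_cypher_for_chain
-- ===== SOURCE A (Python) =====
-- def create_cypher_for_chain(relation_chain):
--     """
--     给定关系链(例如 ["r1", "r2", "r3"]),
--     生成用于匹配的 Cypher 语句, 以获取 (a, b)，其中:
--       a = 起点
--       b = 终点
--     示例输出:
--       MATCH (a)-[:RELATION {name:'r1'}]->(n1)-[:RELATION {name:'r2'}]->(n2)-[:RELATION {name:'r3'}]->(b)
--       RETURN a, b
--     """
--
--     # 为了在 Cypher 中引用不同节点，用 a, n1, n2, ..., b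
--     var_list = []
--     var_list.append("a")  # start
--     for i in range(len(relation_chain) - 1):
--         var_list.append(f"n{i}")
--     var_list.append("b")  # end
--
--     # 构造中间语句
--     match_parts = []
--     for i in range(len(relation_chain)):
--         # relation_chain[i] 是关系名
--         curr_relation = relation_chain[i]
--         left_node = var_list[i]
--         right_node = var_list[i+1]
--
--         seg = f"-[:RELATION {{name: '{curr_relation}'}}]->({right_node})"
--         match_parts.append(seg)
--
--     # 用连字符连接
--     match_str = "("+var_list[0]+")"
--     for seg in match_parts:
--         match_str +=  seg
--
--     cypher = f"""
--     MATCH {match_str}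
--     RETURN a, b
--     """
--     return cypher
-- ===== SOURCE B (Python) =====
-- def create_cypher_for_chain(relation_chain):
--     # Build the pattern back-to-front: walk the chain from the last relation to
--     # the first, collecting segments while carrying the segment's right node
--     # name as loop state ("b" for the last segment, then n{i-1} for the one
--     # before), and join everything in reverse at the end.
--     parts = []
--     right = "b"
--     for i in range(len(relation_chain) - 1, -1, -1):
--         parts.append(f"-[:RELATION {{name: '{relation_chain[i]}'}}]->({right})")
--         right = f"n{i - 1}"
--     parts.append("(a)")
--     match_str = "".join(reversed(parts))
--     cypher = f"""
--     MATCH {match_str}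
--     RETURN a, b
--     """
--     return cypher
-- ===== Notes on version B (the rewrite author's own statement) =====
-- stated objective: alternative
-- what changed: Replaces A's three staged passes (build a var_list node-name table, build a match_parts segment list indexed into that table, then fold the segments left-to-right) by a single reverse loop that walks the chain from the last relation to the first, carrying each segment's right node name as loop state instead of looking it up in a table, and joins the collected parts in reverse at the end.
import Mathlib
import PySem

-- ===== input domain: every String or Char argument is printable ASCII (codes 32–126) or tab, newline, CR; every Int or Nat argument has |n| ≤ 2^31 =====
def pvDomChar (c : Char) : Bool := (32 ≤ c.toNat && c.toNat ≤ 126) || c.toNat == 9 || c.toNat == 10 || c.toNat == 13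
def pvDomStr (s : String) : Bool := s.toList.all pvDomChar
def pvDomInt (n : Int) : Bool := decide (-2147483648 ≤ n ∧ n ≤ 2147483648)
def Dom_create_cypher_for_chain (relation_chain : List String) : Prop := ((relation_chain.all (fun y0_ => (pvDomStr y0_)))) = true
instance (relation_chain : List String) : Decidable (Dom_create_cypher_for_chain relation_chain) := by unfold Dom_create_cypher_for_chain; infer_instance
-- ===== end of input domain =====

-- B replaces A's three staged passes (node-name table, segment list, left-to-right fold)
-- by one reverse loop building the pattern back-to-front with the right node carried as state.

-- ===== PORT A =====
def create_cypher_for_chain (relation_chain : List String) : String :=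
  let var_list : List String := ["a"]
  let var_list := (PySem.List.pyRange 0 ((relation_chain.length : Int) - 1) 1).foldl
    (fun acc i => acc ++ ["n" ++ PySem.Int.toStr i]) var_list
  let var_list := var_list ++ ["b"]
  let match_parts := (PySem.List.pyRange 0 (relation_chain.length : Int) 1).foldl
    (fun acc i =>
      -- indices i and i+1 are always in range here, so pyGetD with a dummy default is exact
      let curr_relation := PySem.List.pyGetD relation_chain i ""
      let _left_node := PySem.List.pyGetD var_list i ""
      let right_node := PySem.List.pyGetD var_list (i + 1) ""
      acc ++ ["-[:RELATION {name: '" ++ curr_relation ++ "'}]->(" ++ right_node ++ ")"])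
    ([] : List String)
  let match_str := "(" ++ PySem.List.pyGetD var_list 0 "" ++ ")"
  let match_str := match_parts.foldl (fun acc seg => acc ++ seg) match_str
  "\n    MATCH " ++ match_str ++ "\n    RETURN a, b\n    "

-- ===== PORT B =====
def create_cypher_for_chain_alt (relation_chain : List String) : String :=
  -- reverse loop over range(len-1, -1, -1) with state (parts, right); join reversed at the end
  let st := (PySem.List.pyRange ((relation_chain.length : Int) - 1) (-1) (-1)).foldl
    (fun (p : List String × String) i =>
      (p.1 ++ ["-[:RELATION {name: '" ++ PySem.List.pyGetD relation_chain i "" ++ "'}]->(" ++ p.2 ++ ")"],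
       "n" ++ PySem.Int.toStr (i - 1)))
    ([], "b")
  let parts := st.1 ++ ["(a)"]
  let match_str := PySem.Str.join "" parts.reverse
  "\n    MATCH " ++ match_str ++ "\n    RETURN a, b\n    "

-- ===== PRECONDITION & SPEC =====
def Spec_create_cypher_for_chain (relation_chain : List String) (out : String) : Prop := out = create_cypher_for_chain_alt relation_chain
instance (relation_chain : List String) (out : String) : Decidable (Spec_create_cypher_for_chain relation_chain out) := by unfold Spec_create_cypher_for_chain; infer_instance

-- ===== CLAIM (what is proved, stated in full; the proofs are below) =====
def Claim_equal_create_cypher_for_chain : Prop := ∀ (relation_chain : List String), Dom_create_cypher_for_chain relation_chain → Spec_create_cypher_for_chain relation_chain (create_cypher_for_chain relation_chain)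

-- ===== LEMMAS AND PROOFS =====

-- the canonical i-th segment of the pattern, for a chain of length n
def pvSeg (rc : List String) (i : Int) : String :=
  "-[:RELATION {name: '" ++ PySem.List.pyGetD rc i "" ++ "'}]->("
    ++ (if i = (rc.length : Int) - 1 then "b" else "n" ++ PySem.Int.toStr i) ++ ")"

-- the A-side lookup of the right node equals the canonical name
theorem right_node_eq (n : Nat) (i : Int) (h0 : 0 ≤ i) (hn : i < (n : Int)) :
    PySem.List.pyGetD
      (("a" :: (PySem.List.pyRange 0 ((n : Int) - 1) 1).map (fun j => "n" ++ PySem.Int.toStr j)) ++ ["b"])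
      (i + 1) "" = (if i = (n : Int) - 1 then "b" else "n" ++ PySem.Int.toStr i) := by
  rw [List.cons_append, PySem.List.pyRange_one]
  have hi1 : 0 ≤ i + 1 := by omega
  have hi2 : i + 1 < (("a" :: ((List.map (fun k : Nat => (0 : Int) + (k : Int)) (List.range ((n : Int) - 1 - 0).toNat)).map (fun j => "n" ++ PySem.Int.toStr j) ++ ["b"])).length : Int) := by
    simp; omega
  rw [PySem.List.pyGetD_eq_getElem _ _ hi1 hi2]
  have hit : (i + 1).toNat = i.toNat + 1 := by omega
  by_cases hlast : i = (n : Int) - 1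
  · simp only [hit, if_pos hlast, List.getElem_cons_succ]
    rw [List.getElem_append_right (by simp; omega)]
    simp
  · have hlt : i.toNat < ((n : Int) - 1 - 0).toNat := by omega
    simp only [hit, if_neg hlast, List.getElem_cons_succ]
    rw [List.getElem_append_left (by simpa using hlt)]
    simp [List.getElem_map, List.getElem_range]
    congr 1
    omega

-- A's left-to-right fold over the segments is the empty-separator join of the list
theorem foldl_string_append_eq_join (l : List String) (acc : String) :
    l.foldl (fun a s => a ++ s) acc = acc ++ PySem.Str.join "" l := by
  induction l generalizing acc with
  | nil => apply String.toList_injective; simp [PySem.Str.join]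
  | cons x xs ih =>
    rw [List.foldl_cons, ih]
    apply String.toList_injective
    cases xs with
    | nil => simp [PySem.Str.join, PySem.Chars.join, List.intercalate]
    | cons y ys => simp [PySem.Str.join, PySem.Chars.join_cons_cons]

-- B's reverse loop: after consuming indices m, m-1, …, 0 starting from (p0, right node of m),
-- the collected parts are p0 followed by segments m, m-1, …, 0
theorem bfold_inv (rc : List String) (m : Nat) (hm : m < rc.length) :
    ∀ (p0 : List String),
      ((PySem.List.pyRange (m : Int) (-1) (-1)).foldl
        (fun (p : List String × String) i =>
          (p.1 ++ ["-[:RELATION {name: '" ++ PySem.List.pyGetD rc i "" ++ "'}]->(" ++ p.2 ++ ")"],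
           "n" ++ PySem.Int.toStr (i - 1)))
        (p0, if (m : Int) = (rc.length : Int) - 1 then "b" else "n" ++ PySem.Int.toStr (m : Int))).1
      = p0 ++ ((List.range (m + 1)).reverse.map (fun k : Nat => pvSeg rc (k : Int))) := by
  induction m with
  | zero =>
    intro p0
    rw [PySem.List.pyRange_neg_one_cons (by norm_num), PySem.List.pyRange_neg_one_eq_nil (by norm_num)]
    simp [pvSeg, PySem.List.pyGetD_zero]
  | succ m ih =>
    intro p0
    have hcast : ((m + 1 : Nat) : Int) = (m : Int) + 1 := by push_cast; ring
    rw [hcast, PySem.List.pyRange_neg_one_cons (by omega)]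
    simp only [List.foldl_cons]
    rw [show (m : Int) + 1 - 1 = (m : Int) from by ring]
    have hmne : (m : Int) ≠ (rc.length : Int) - 1 := by omega
    have hstate :
        (p0 ++ ["-[:RELATION {name: '" ++ PySem.List.pyGetD rc ((m : Int) + 1) "" ++ "'}]->("
            ++ (if (m : Int) + 1 = (rc.length : Int) - 1 then "b" else "n" ++ PySem.Int.toStr ((m : Int) + 1)) ++ ")"],
         "n" ++ PySem.Int.toStr (m : Int))
        = (p0 ++ [pvSeg rc ((m : Int) + 1)],
           if (m : Int) = (rc.length : Int) - 1 then "b" else "n" ++ PySem.Int.toStr (m : Int)) := by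
      rw [if_neg hmne]
      simp [pvSeg]
    rw [hstate]
    rw [ih (by omega) (p0 ++ [pvSeg rc ((m : Int) + 1)])]
    rw [List.range_succ (n := m + 1)]
    simp [hcast]

-- empty-separator join peels its head segment
theorem joinEmpty_cons (x : List Char) (l : List (List Char)) :
    PySem.Chars.join [] (x :: l) = x ++ PySem.Chars.join [] l := by
  cases l with
  | nil => simp [PySem.Chars.join, List.intercalate]
  | cons y ys => simp [PySem.Chars.join_cons_cons]

-- ===== VERDICT (by name: the statement is the Claim_ definition above) =====
theorem create_cypher_for_chain_spec : Claim_equal_create_cypher_for_chain := by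
  intro rc _
  unfold Spec_create_cypher_for_chain create_cypher_for_chain create_cypher_for_chain_alt
  simp only [PySem.List.foldl_append_singleton_eq_map, List.singleton_append, List.nil_append]
  have hmap :
      (PySem.List.pyRange 0 (rc.length : Int) 1).map
        (fun i => "-[:RELATION {name: '" ++ PySem.List.pyGetD rc i "" ++ "'}]->("
          ++ PySem.List.pyGetD (("a" :: (PySem.List.pyRange 0 ((rc.length : Int) - 1) 1).map (fun j => "n" ++ PySem.Int.toStr j)) ++ ["b"]) (i + 1) "" ++ ")")
      = (PySem.List.pyRange 0 (rc.length : Int) 1).map (fun i => pvSeg rc i) := by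
    apply List.map_congr_left
    intro i hi
    rw [PySem.List.mem_pyRange_one] at hi
    rw [right_node_eq rc.length i hi.1 hi.2]
    rfl
  rw [hmap, foldl_string_append_eq_join, List.cons_append, PySem.List.pyGetD_zero_cons]
  cases hrc : rc.length with
  | zero =>
    rw [PySem.List.pyRange_one_eq_nil (by simp), PySem.List.pyRange_neg_one_eq_nil (by simp)]
    apply String.toList_injective
    simp [PySem.Str.join, PySem.Chars.join, List.intercalate]
  | succ m =>
    have hb : ((m + 1 : Nat) : Int) - 1 = (m : Int) := by push_cast; ring
    have hinv := bfold_inv rc m (by omega) []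
    rw [hrc] at hinv
    rw [show (if (m : Int) = ((m + 1 : Nat) : Int) - 1 then "b" else "n" ++ PySem.Int.toStr (m : Int)) = "b"
        from by rw [hb]; simp] at hinv
    rw [hb, hinv]
    have hseg : (PySem.List.pyRange 0 ((m + 1 : Nat) : Int) 1).map (fun i => pvSeg rc i)
        = (List.range (m + 1)).map (fun k : Nat => pvSeg rc (k : Int)) := by
      rw [PySem.List.pyRange_one]
      simp
    rw [hseg]
    apply String.toList_injective
    simp [PySem.Str.join, joinEmpty_cons]
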